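-- pv_equiv track=rewrite | github.com/LuvGentleSheep/mainquest | journal_utils.py | _remove_existing_block
-- ===== SOURCE A (Python) =====
-- def _remove_existing_block(content: str, link_href: str) -> str:
--     marker = f'href="{link_href}"'
--     target_idx = content.find(marker)
--     if target_idx == -1:
--         return content
--     start = content.rfind('<div class="update-item"', 0, target_idx)
--     if start == -1:
--         return content
--     depth = 0
--     pos = start
--     length = len(content)
--     while pos < length:
--         next_open = content.find("<div", pos)
--         next_close = content.find("</div>", pos)
--         if next_open == -1 and next_close == -1:
--             break
--         if next_open != -1 and (next_open < next_close or next_close == -1):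
--             depth += 1
--             pos = next_open + 4
--             continue
--         if next_close != -1:
--             depth -= 1
--             pos = next_close + len("</div>")
--             if depth == 0:
--                 end = pos
--                 trimmed = content[:start].rstrip() + "\n" + content[end:].lstrip()
--                 return trimmed
--         else:
--             break
--     return content
-- ===== SOURCE B (Python) =====
-- def _remove_existing_block(content: str, link_href: str) -> str:
--     marker = f'href="{link_href}"'
--     target_idx = content.find(marker)
--     if target_idx == -1:
--         return content
--     start = content.rfind('<div class="update-item"', 0, target_idx)
--     if start == -1:
--         return content
--     depth = 0
--     i = start
--     n = len(content)
--     while i < n: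
--         if content.startswith("</div>", i):
--             depth -= 1
--             i += 6
--             if depth == 0:
--                 return content[:start].rstrip() + "\n" + content[i:].lstrip()
--         elif content.startswith("<div", i):
--             depth += 1
--             i += 4
--         else:
--             i += 1
--     return content
-- ===== Notes on version B (the rewrite author's own statement) =====
-- stated objective: alternative
-- what changed: The depth-counting loop that re-ran content.find for both '<div' and '</div>' from every new position (jumping between the two find results) is replaced by a single left-to-right character scan that tests startswith at each position; preamble (marker find, rfind of the opening div) unchanged.
import Mathlib
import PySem

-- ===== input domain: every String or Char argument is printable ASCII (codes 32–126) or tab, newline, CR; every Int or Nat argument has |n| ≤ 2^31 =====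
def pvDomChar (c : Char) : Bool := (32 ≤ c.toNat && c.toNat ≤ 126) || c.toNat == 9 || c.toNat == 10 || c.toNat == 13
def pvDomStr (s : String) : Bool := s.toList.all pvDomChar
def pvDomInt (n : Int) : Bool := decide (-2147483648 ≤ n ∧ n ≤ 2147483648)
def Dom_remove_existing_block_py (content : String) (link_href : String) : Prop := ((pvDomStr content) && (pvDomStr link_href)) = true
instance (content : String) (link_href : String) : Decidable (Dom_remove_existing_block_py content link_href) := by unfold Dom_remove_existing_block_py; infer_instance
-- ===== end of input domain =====

-- A removes the balanced <div class="update-item"> block containing a given href link.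
-- B: same preamble, but the depth walk is a single left-to-right character scan with startswith
-- tests instead of re-running find for both tags from every new position (alternative decomposition).


def pvOpenTag : List Char := "<div".toList
def pvCloseTag : List Char := "</div>".toList
def pvItemTag : List Char := ("<div class=\"update-item\"").toList

-- ===== PORT A =====
-- A's while loop: repeated find of "<div" / "</div>" from pos, depth counting.
def pvALoop (s : List Char) (start : Nat) (depth : Int) (pos : Nat) : List Char :=
  if _h : pos < s.length then
    let no := PySem.Chars.findFrom s pvOpenTag (pos : Int) none
    let nc := PySem.Chars.findFrom s pvCloseTag (pos : Int) none
    if _h1 : no = -1 ∧ nc = -1 then s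
    else if _h2 : no ≠ -1 ∧ (no < nc ∨ nc = -1) then
      pvALoop s start (depth + 1) (no.toNat + 4)
    else if _h3 : nc ≠ -1 then
      if depth - 1 = 0 then
        PySem.Chars.rstrip (s.take start) ++ '\n' :: PySem.Chars.lstrip (s.drop (nc.toNat + 6))
      else pvALoop s start (depth - 1) (nc.toNat + 6)
    else s
  else s
termination_by s.length - pos
decreasing_by
  · have hk : (pos : Int) ≤ s.length := by exact_mod_cast Nat.le_of_lt _h
    have := (PySem.Chars.findFrom_natCast_spec s pvOpenTag pos (by exact_mod_cast hk) (by exact _h2.1)).1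
    omega
  · have hk : (pos : Int) ≤ s.length := by exact_mod_cast Nat.le_of_lt _h
    have := (PySem.Chars.findFrom_natCast_spec s pvCloseTag pos (by exact_mod_cast hk) (by exact _h3)).1
    omega

def remove_existing_block_py (content : String) (link_href : String) : String :=
  let s := content.toList
  let marker := ("href=\"").toList ++ link_href.toList ++ ['"']
  let target_idx := PySem.Chars.find s marker
  if target_idx = -1 then content
  else
    let start := PySem.Chars.rfindFrom s pvItemTag 0 (some target_idx)
    if start = -1 then content
    else String.ofList (pvALoop s start.toNat 0 start.toNat)

-- ===== PORT B =====
-- B's while loop: one character-by-character scan testing startswith at each position.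
def pvBLoop (s : List Char) (start : Nat) (depth : Int) (i : Nat) : List Char :=
  if _h : i < s.length then
    if PySem.Chars.startswith (s.drop i) pvCloseTag then
      if depth - 1 = 0 then
        PySem.Chars.rstrip (s.take start) ++ '\n' :: PySem.Chars.lstrip (s.drop (i + 6))
      else pvBLoop s start (depth - 1) (i + 6)
    else if PySem.Chars.startswith (s.drop i) pvOpenTag then
      pvBLoop s start (depth + 1) (i + 4)
    else pvBLoop s start depth (i + 1)
  else s
termination_by s.length - i
decreasing_by all_goals omega

def remove_existing_block_py_alt (content : String) (link_href : String) : String :=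
  let s := content.toList
  let marker := ("href=\"").toList ++ link_href.toList ++ ['"']
  let target_idx := PySem.Chars.find s marker
  if target_idx = -1 then content
  else
    let start := PySem.Chars.rfindFrom s pvItemTag 0 (some target_idx)
    if start = -1 then content
    else String.ofList (pvBLoop s start.toNat 0 start.toNat)

-- ===== PRECONDITION & SPEC =====
def Spec_remove_existing_block_py (content : String) (link_href : String) (out : String) : Prop := out = remove_existing_block_py_alt content link_href
instance (content : String) (link_href : String) (out : String) : Decidable (Spec_remove_existing_block_py content link_href out) := by unfold Spec_remove_existing_block_py; infer_instance

-- ===== CLAIM (what is proved, stated in full; the proofs are below) =====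
def Claim_equal_remove_existing_block_py : Prop := ∀ (content : String) (link_href : String), Dom_remove_existing_block_py content link_href → Spec_remove_existing_block_py content link_href (remove_existing_block_py content link_href)

-- ===== LEMMAS AND PROOFS =====



lemma pv_not_open_and_close (d : List Char) (h1 : pvOpenTag <+: d) (h2 : pvCloseTag <+: d) : False := by
  obtain ⟨r1, rfl⟩ := h1
  obtain ⟨r2, e⟩ := h2
  simp [pvOpenTag, pvCloseTag] at e

-- a findFrom miss means no occurrence anywhere at or after pos
lemma pv_none (s sub : List Char) (pos j : Nat) (hk : pos ≤ s.length)
    (h : PySem.Chars.findFrom s sub (pos : Int) none = -1) (hj : pos ≤ j) :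
    ¬ sub <+: s.drop j := by
  rw [PySem.Chars.findFrom_natCast_eq_neg_one_iff s sub pos hk] at h
  intro hp
  apply h
  have hd : s.drop j = (s.drop pos).drop (j - pos) := by
    rw [List.drop_drop]; congr 1; omega
  exact (PySem.Chars.isIn_iff_infix _ _).mp
    ((PySem.Chars.exists_prefix_drop_iff_isIn _ _).mp ⟨j - pos, hd ▸ hp⟩)

-- skipping positions carrying no tag leaves pvBLoop unchanged
lemma pvBLoop_skip (s : List Char) (start : Nat) (depth : Int) :
    ∀ k pos t : Nat, t - pos ≤ k → pos ≤ t → t ≤ s.length →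
    (∀ j, pos ≤ j → j < t → ¬ pvOpenTag <+: s.drop j ∧ ¬ pvCloseTag <+: s.drop j) →
    pvBLoop s start depth pos = pvBLoop s start depth t := by
  intro k
  induction k with
  | zero =>
    intro pos t h1 h2 _ _
    have : pos = t := by omega
    rw [this]
  | succ k ih =>
    intro pos t h1 h2 h3 h4
    rcases eq_or_lt_of_le h2 with rfl | hlt
    · rfl
    · have hpl : pos < s.length := by omega
      rw [pvBLoop, dif_pos hpl,
        if_neg (fun hh => (h4 pos le_rfl hlt).2 ((PySem.Chars.startswith_iff _ _).mp hh)),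
        if_neg (fun hh => (h4 pos le_rfl hlt).1 ((PySem.Chars.startswith_iff _ _).mp hh))]
      exact ih (pos + 1) t (by omega) (by omega) h3 (fun j hj hjt => h4 j (by omega) hjt)

lemma pv_open_step (s : List Char) (start : Nat) (depth : Int) (pos n : Nat)
    (ih : ∀ depth pos, s.length - pos ≤ n → pvALoop s start depth pos = pvBLoop s start depth pos)
    (hpos : pos < s.length) (hn : s.length - pos ≤ n + 1)
    (hno : PySem.Chars.findFrom s pvOpenTag (pos : Int) none ≠ -1)
    (hcase : PySem.Chars.findFrom s pvOpenTag (pos : Int) none <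
        PySem.Chars.findFrom s pvCloseTag (pos : Int) none ∨
      PySem.Chars.findFrom s pvCloseTag (pos : Int) none = -1)
    (hge : (pos : Int) ≤ PySem.Chars.findFrom s pvOpenTag (pos : Int) none)
    (hpre : pvOpenTag <+: s.drop (PySem.Chars.findFrom s pvOpenTag (pos : Int) none).toNat)
    (hmin : ∀ i, pos ≤ i → i < (PySem.Chars.findFrom s pvOpenTag (pos : Int) none).toNat →
      ¬ pvOpenTag <+: s.drop i)
    (hnoc : ∀ j, pos ≤ j → j < (PySem.Chars.findFrom s pvOpenTag (pos : Int) none).toNat →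
      ¬ pvCloseTag <+: s.drop j) :
    pvALoop s start depth pos = pvBLoop s start depth pos := by
  rw [pvALoop]
  simp only [dif_pos hpos]
  rw [dif_neg (fun hh => hno hh.1), dif_pos ⟨hno, hcase⟩]
  set t := (PySem.Chars.findFrom s pvOpenTag (pos : Int) none).toNat with ht
  have hlen : t + 4 ≤ s.length := by
    have h4 := hpre.length_le
    simp [pvOpenTag] at h4
    omega
  rw [pvBLoop_skip s start depth t pos t (by omega) (by omega) (by omega)
      (fun j hj hjt => ⟨hmin j hj hjt, hnoc j hj hjt⟩),
    pvBLoop, dif_pos (show t < s.length by omega),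
    if_neg (fun hh => pv_not_open_and_close _ hpre ((PySem.Chars.startswith_iff _ _).mp hh)),
    if_pos ((PySem.Chars.startswith_iff _ _).mpr hpre)]
  exact ih (depth + 1) (t + 4) (by omega)

lemma pv_close_step (s : List Char) (start : Nat) (depth : Int) (pos n : Nat)
    (ih : ∀ depth pos, s.length - pos ≤ n → pvALoop s start depth pos = pvBLoop s start depth pos)
    (hpos : pos < s.length) (hn : s.length - pos ≤ n + 1)
    (hnc : PySem.Chars.findFrom s pvCloseTag (pos : Int) none ≠ -1)
    (hnot2 : ¬ (PySem.Chars.findFrom s pvOpenTag (pos : Int) none ≠ -1 ∧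
      (PySem.Chars.findFrom s pvOpenTag (pos : Int) none <
          PySem.Chars.findFrom s pvCloseTag (pos : Int) none ∨
        PySem.Chars.findFrom s pvCloseTag (pos : Int) none = -1)))
    (hge : (pos : Int) ≤ PySem.Chars.findFrom s pvCloseTag (pos : Int) none)
    (hpre : pvCloseTag <+: s.drop (PySem.Chars.findFrom s pvCloseTag (pos : Int) none).toNat)
    (hmin : ∀ i, pos ≤ i → i < (PySem.Chars.findFrom s pvCloseTag (pos : Int) none).toNat →
      ¬ pvCloseTag <+: s.drop i)
    (hnoo : ∀ j, pos ≤ j → j < (PySem.Chars.findFrom s pvCloseTag (pos : Int) none).toNat →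
      ¬ pvOpenTag <+: s.drop j) :
    pvALoop s start depth pos = pvBLoop s start depth pos := by
  rw [pvALoop]
  simp only [dif_pos hpos]
  rw [dif_neg (fun hh => hnc hh.2), dif_neg hnot2, dif_pos hnc]
  set t := (PySem.Chars.findFrom s pvCloseTag (pos : Int) none).toNat with ht
  have hlen : t + 6 ≤ s.length := by
    have h6 := hpre.length_le
    simp [pvCloseTag] at h6
    omega
  rw [pvBLoop_skip s start depth t pos t (by omega) (by omega) (by omega)
      (fun j hj hjt => ⟨hnoo j hj hjt, hmin j hj hjt⟩),
    pvBLoop, dif_pos (show t < s.length by omega),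
    if_pos ((PySem.Chars.startswith_iff _ _).mpr hpre)]
  split_ifs with hd
  · rfl
  · exact ih (depth - 1) (t + 6) (by omega)

lemma pv_loop_eq (s : List Char) (start : Nat) :
    ∀ n depth pos, s.length - pos ≤ n → pvALoop s start depth pos = pvBLoop s start depth pos := by
  intro n
  induction n with
  | zero =>
    intro depth pos hn
    have hpos : ¬ pos < s.length := by omega
    rw [pvALoop, pvBLoop, dif_neg hpos, dif_neg hpos]
  | succ n ih =>
    intro depth pos hn
    by_cases hpos : pos < s.length
    · have hk : pos ≤ s.length := le_of_lt hpos
      by_cases hno : PySem.Chars.findFrom s pvOpenTag (pos : Int) none = -1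
      · by_cases hnc : PySem.Chars.findFrom s pvCloseTag (pos : Int) none = -1
        · -- no tag at all: both fall through to the end
          rw [pvALoop]
          simp only [dif_pos hpos]
          rw [dif_pos ⟨hno, hnc⟩,
            pvBLoop_skip s start depth s.length pos s.length (by omega) hk le_rfl
              (fun j hj _ => ⟨pv_none s pvOpenTag pos j hk hno hj, pv_none s pvCloseTag pos j hk hnc hj⟩),
            pvBLoop, dif_neg (by omega)]
        · -- close only
          have cspec := PySem.Chars.findFrom_natCast_spec s pvCloseTag pos hk hnc
          exact pv_close_step s start depth pos n ih hpos hn hnc (fun hh => hh.1 hno)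
            cspec.1 cspec.2.1 cspec.2.2 (fun j hj _ => pv_none s pvOpenTag pos j hk hno hj)
      · have ospec := PySem.Chars.findFrom_natCast_spec s pvOpenTag pos hk hno
        by_cases hnc : PySem.Chars.findFrom s pvCloseTag (pos : Int) none = -1
        · -- open only
          exact pv_open_step s start depth pos n ih hpos hn hno (Or.inr hnc) ospec.1 ospec.2.1 ospec.2.2
            (fun j hj _ => pv_none s pvCloseTag pos j hk hnc hj)
        · have cspec := PySem.Chars.findFrom_natCast_spec s pvCloseTag pos hk hnc
          by_cases hlt : PySem.Chars.findFrom s pvOpenTag (pos : Int) none <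
              PySem.Chars.findFrom s pvCloseTag (pos : Int) none
          · -- open first
            exact pv_open_step s start depth pos n ih hpos hn hno (Or.inl hlt) ospec.1 ospec.2.1 ospec.2.2
              (fun j hj hjt => cspec.2.2 j hj (by omega))
          · -- close first (close index ≤ open index)
            exact pv_close_step s start depth pos n ih hpos hn hnc
              (fun hh => hh.2.elim hlt (fun e => hnc e))
              cspec.1 cspec.2.1 cspec.2.2
              (fun j hj hjt => ospec.2.2 j hj (by omega))
    · rw [pvALoop, pvBLoop, dif_neg hpos, dif_neg hpos]

-- ===== VERDICT =====
theorem remove_existing_block_py_spec : Claim_equal_remove_existing_block_py := by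
  intro content link_href _
  unfold Spec_remove_existing_block_py remove_existing_block_py remove_existing_block_py_alt
  simp only []
  split_ifs with h1 h2
  · rfl
  · rfl
  · exact congrArg String.ofList (pv_loop_eq _ _ content.toList.length 0 _ (Nat.sub_le _ _))
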